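-- pv_equiv track=rewrite | github.com/zxgsy520/Assemble_QC | scripts/stat_genome.py | split_scaffold
-- ===== SOURCE A (Python) =====
-- def split_scaffold(seq):    #分割序列
--
--     tigseqs = []
--     tigseq = ""
--     gaplens = []
--     n = 1
--     tempn = 0
--
--     for i in seq:
--         n += 1
--         if i == "N":
--             if tigseq:
--                 end = n-2
--                 start = end - len(tigseq) + 1
--                 tigseqs.append(["%s-%s" % (start, end), tigseq])
--                 tigseq = ""
--             tempn += 1
--             continue
--         if tempn:
--             gaplens.append(tempn)
--         start = n
--         tempn = 0
--         tigseq += i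
--     if tempn:
--         gaplens.append(tempn)
--
--     if tigseq:
--         end = n - 1
--         start = end - len(tigseq) + 1
--         tigseqs.append(["%s-%s" % (start, end), tigseq])
--
--     return gaplens, tigseqs
-- ===== SOURCE B (Python) =====
-- from itertools import groupby
--
-- def split_scaffold(seq):
--     gaplens = []
--     tigseqs = []
--     pos = 1
--     for is_gap, grp in groupby(seq, key=lambda c: c == "N"):
--         s = "".join(grp)
--         L = len(s)
--         if is_gap:
--             gaplens.append(L)
--         else:
--             tigseqs.append(["%s-%s" % (pos, pos + L - 1), s])
--         pos += L
--     return gaplens, tigseqs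
-- ===== Notes on version B (the rewrite author's own statement) =====
-- stated objective: simpler
-- what changed: B replaces A's character-at-a-time state machine (pending contig buffer, gap counter, deferred flushes at loop end) by an itertools.groupby pass over maximal N/non-N runs with a single running 1-based position, emitting each gap length or contig record directly per run.
import Mathlib
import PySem

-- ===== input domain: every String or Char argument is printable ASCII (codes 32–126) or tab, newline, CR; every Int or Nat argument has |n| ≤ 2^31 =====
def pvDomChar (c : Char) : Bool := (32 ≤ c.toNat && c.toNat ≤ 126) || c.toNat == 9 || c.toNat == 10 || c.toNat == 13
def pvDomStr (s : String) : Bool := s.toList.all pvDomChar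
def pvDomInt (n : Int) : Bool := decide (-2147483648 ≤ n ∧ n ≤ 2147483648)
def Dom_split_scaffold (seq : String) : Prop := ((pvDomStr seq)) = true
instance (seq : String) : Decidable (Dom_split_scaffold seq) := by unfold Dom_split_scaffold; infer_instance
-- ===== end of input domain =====

-- B replaces A's character-level state machine by a run-at-a-time (groupby) pass; same O(n) cost, simpler decomposition.

-- ===== PORT A =====
-- "%s-%s" % (start, end)
def pvFmt (a b : Int) : String := PySem.Int.toStr a ++ "-" ++ PySem.Int.toStr b

-- loop body of A; state = (tigseqs, tigseq, gaplens, n, tempn); tigseq kept as List Char (Python string concat)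
def pvStepA (st : List (List String) × List Char × List Int × Int × Int) (i : Char) :
    List (List String) × List Char × List Int × Int × Int :=
  match st with
  | (tigseqs, tigseq, gaplens, n, tempn) =>
    let n := n + 1
    if i == 'N' then
      if tigseq.isEmpty then (tigseqs, tigseq, gaplens, n, tempn + 1)
      else
        let e := n - 2
        let s := e - (tigseq.length : Int) + 1
        (tigseqs ++ [[pvFmt s e, String.ofList tigseq]], [], gaplens, n, tempn + 1)
    else
      let gaplens := if tempn ≠ 0 then gaplens ++ [tempn] else gaplens
      (tigseqs, tigseq ++ [i], gaplens, n, 0)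

-- the post-loop code of A
def pvFinishA (st : List (List String) × List Char × List Int × Int × Int) :
    List Int × List (List String) :=
  match st with
  | (tigseqs, tigseq, gaplens, n, tempn) =>
    let gaplens := if tempn ≠ 0 then gaplens ++ [tempn] else gaplens
    let tigseqs :=
      if tigseq.isEmpty then tigseqs
      else
        let e := n - 1
        let s := e - (tigseq.length : Int) + 1
        tigseqs ++ [[pvFmt s e, String.ofList tigseq]]
    (gaplens, tigseqs)

def split_scaffold (seq : String) : List Int × List (List String) :=
  pvFinishA (seq.toList.foldl pvStepA ([], [], [], 1, 0))

-- ===== PORT B =====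
-- B: groupby into maximal runs of equal (c == 'N') key, one record per run, 1-based running position
def pvBloop : List Char → Int → List Int × List (List String)
  | [], _ => ([], [])
  | c :: cs, pos =>
    let run := c :: cs.takeWhile (fun d => (d == 'N') == (c == 'N'))
    let rest := cs.dropWhile (fun d => (d == 'N') == (c == 'N'))
    let L : Int := run.length
    if c == 'N' then (L :: (pvBloop rest (pos + L)).1, (pvBloop rest (pos + L)).2)
    else ((pvBloop rest (pos + L)).1,
          [pvFmt pos (pos + L - 1), String.ofList run] :: (pvBloop rest (pos + L)).2)
termination_by cs _ => cs.length
decreasing_by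
  all_goals simpa using Nat.lt_succ_of_le (List.length_dropWhile_le _ _)

def split_scaffold_alt (seq : String) : List Int × List (List String) :=
  pvBloop seq.toList 1

-- ===== PRECONDITION & SPEC =====
def Spec_split_scaffold (seq : String) (out : List Int × List (List String)) : Prop := out = split_scaffold_alt seq
instance (seq : String) (out : List Int × List (List String)) : Decidable (Spec_split_scaffold seq out) := by unfold Spec_split_scaffold; infer_instance

-- ===== CLAIM (what is proved, stated in full; the proofs are below) =====
def Claim_equal_split_scaffold : Prop := ∀ (seq : String), Dom_split_scaffold seq → Spec_split_scaffold seq (split_scaffold seq)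

-- ===== LEMMAS AND PROOFS =====

-- continuing an N-run with an empty pending contig just counts
lemma pv_foldl_Nrun (run : List Char) (hrun : ∀ d ∈ run, d = 'N') :
    ∀ (ts : List (List String)) (gs : List Int) (n t : Int),
    List.foldl pvStepA (ts, ([] : List Char), gs, n, t) run
      = (ts, [], gs, n + run.length, t + run.length) := by
  induction run with
  | nil => intro ts gs n t; simp
  | cons c cs ih =>
    intro ts gs n t
    have hc : c = 'N' := hrun c (List.mem_cons_self ..)
    have ih' := ih (fun d hd => hrun d (List.mem_cons_of_mem _ hd)) ts gs (n + 1) (t + 1)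
    simp only [List.foldl_cons, pvStepA, hc, List.isEmpty_nil, beq_self_eq_true, if_true]
    rw [ih']
    simp only [Prod.mk.injEq, List.length_cons, true_and]
    push_cast; constructor <;> ring

-- continuing a non-N run with zero pending gap just extends the contig
lemma pv_foldl_Crun (run : List Char) (hrun : ∀ d ∈ run, d ≠ 'N') :
    ∀ (ts : List (List String)) (tig : List Char) (gs : List Int) (n : Int),
    List.foldl pvStepA (ts, tig, gs, n, 0) run
      = (ts, tig ++ run, gs, n + run.length, 0) := by
  induction run with
  | nil => intro ts tig gs n; simp
  | cons c cs ih =>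
    intro ts tig gs n
    have hc : c ≠ 'N' := hrun c (List.mem_cons_self ..)
    have ih' := ih (fun d hd => hrun d (List.mem_cons_of_mem _ hd)) ts (tig ++ [c]) gs (n + 1)
    simp only [List.foldl_cons, pvStepA, beq_iff_eq, hc, if_false, ne_eq, not_true_eq_false]
    rw [ih']
    simp only [Prod.mk.injEq, List.length_cons, List.append_assoc, List.cons_append,
      List.nil_append, true_and]
    push_cast
    exact ⟨by ring, trivial⟩

-- the pending-contig flush (performed by A either at the first N of a gap or after the loop)
def pvFlush (tig : List Char) (n : Int) : List (List String) :=
  if tig.isEmpty then []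
  else [[pvFmt (n - 1 - (tig.length : Int) + 1) (n - 1), String.ofList tig]]

lemma pv_head_dropWhile (p : Char → Bool) (l : List Char) (d : Char)
    (h : (l.dropWhile p).head? = some d) : p d = false := by
  induction l with
  | nil => simp [List.dropWhile] at h
  | cons a l ih =>
    rw [List.dropWhile_cons] at h
    split at h
    · exact ih h
    · simp_all

lemma pv_main (m : Nat) :
    ∀ (cs : List Char), cs.length ≤ m →
    ∀ (ts : List (List String)) (tig : List Char) (gs : List Int) (n t : Int),
    (tig ≠ [] → t = 0 ∧ ∀ d, cs.head? = some d → d = 'N') →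
    (t ≠ 0 → tig = [] ∧ ∀ d, cs.head? = some d → d ≠ 'N') →
    pvFinishA (List.foldl pvStepA (ts, tig, gs, n, t) cs)
      = (gs ++ (if t ≠ 0 then [t] else []) ++ (pvBloop cs n).1,
         ts ++ pvFlush tig n ++ (pvBloop cs n).2) := by
  induction m with
  | zero =>
    intro cs hlen ts tig gs n t h1 h2
    have hnil : cs = [] := List.eq_nil_of_length_eq_zero (Nat.le_zero.mp hlen)
    subst hnil
    simp [pvBloop, pvFinishA, pvFlush]
    split_ifs <;> simp
  | succ m ih =>
    intro cs hlen ts tig gs n t h1 h2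
    cases cs with
    | nil =>
      simp [pvBloop, pvFinishA, pvFlush]
      split_ifs <;> simp
    | cons c cs' =>
      have hlen' : cs'.length ≤ m := by simpa using Nat.succ_le_succ_iff.mp hlen
      by_cases hc : c = 'N'
      · -- gap run
        subst hc
        have ht : t = 0 := by
          by_contra htne
          exact (h2 htne).2 'N' rfl rfl
        subst ht
        set p : Char → Bool := fun d => (d == 'N') == (('N' : Char) == 'N') with hp
        have hstep : pvStepA (ts, tig, gs, n, 0) 'N'
            = (ts ++ pvFlush tig n, [], gs, n + 1, 1) := by
          by_cases htig : tig.isEmpty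
          · have : tig = [] := List.isEmpty_iff.mp htig
            subst this
            simp [pvStepA, pvFlush]
          · simp only [pvStepA, pvFlush, beq_self_eq_true, if_true, htig, Bool.false_eq_true,
              if_false]
            have e1 : n + 1 - 2 = n - 1 := by ring
            rw [e1]
            norm_num
        have htk : ∀ d ∈ cs'.takeWhile p, d = 'N' := by
          intro d hd
          have := List.mem_takeWhile_imp hd
          simpa [hp] using this
        have hsplit : cs'.takeWhile p ++ cs'.dropWhile p = cs' :=
          List.takeWhile_append_dropWhile
        have hN := pv_foldl_Nrun (cs'.takeWhile p) htk (ts ++ pvFlush tig n) gs (n + 1) 1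
        have hrest : ∀ d, (cs'.dropWhile p).head? = some d → d ≠ 'N' := by
          intro d hd
          have := pv_head_dropWhile p cs' d hd
          simp [hp] at this
          simpa using this
        set k : Nat := (cs'.takeWhile p).length with hk
        have hkpos : (1 : Int) + (k : Int) ≠ 0 := by positivity
        have hih := ih (cs'.dropWhile p)
          (le_trans (List.length_dropWhile_le _ _) hlen')
          (ts ++ pvFlush tig n) [] gs (n + 1 + (k : Int)) (1 + (k : Int))
          (by intro h; exact absurd rfl h)
          (by intro _; exact ⟨rfl, hrest⟩)
        have hB : pvBloop ('N' :: cs') n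
            = ((1 + (k : Int)) :: (pvBloop (cs'.dropWhile p) (n + 1 + (k : Int))).1,
               (pvBloop (cs'.dropWhile p) (n + 1 + (k : Int))).2) := by
          rw [pvBloop]
          rw [← hp]
          simp only [beq_self_eq_true, if_true, List.length_cons, ← hk]
          have e : n + ((k + 1 : Nat) : Int) = n + 1 + (k : Int) := by push_cast; ring
          rw [e]
          have e2 : ((k + 1 : Nat) : Int) = 1 + (k : Int) := by push_cast; ring
          rw [e2]
        calc pvFinishA (List.foldl pvStepA (ts, tig, gs, n, 0) ('N' :: cs'))
            = pvFinishA (List.foldl pvStepA (ts ++ pvFlush tig n, [], gs, n + 1, 1)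
                (cs'.takeWhile p ++ cs'.dropWhile p)) := by
              rw [hsplit, List.foldl_cons, hstep]
          _ = pvFinishA (List.foldl pvStepA
                (ts ++ pvFlush tig n, [], gs, n + 1 + (k : Int), 1 + (k : Int))
                (cs'.dropWhile p)) := by
              rw [List.foldl_append, hN]
          _ = (gs ++ (if (0 : Int) ≠ 0 then [(0 : Int)] else []) ++ (pvBloop ('N' :: cs') n).1,
               ts ++ pvFlush tig n ++ (pvBloop ('N' :: cs') n).2) := by
              rw [hih, hB]
              simp [pvFlush, hkpos]
      · -- contig run
        have htig : tig = [] := by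
          by_contra htne
          exact hc ((h1 htne).2 c rfl)
        subst htig
        set p : Char → Bool := fun d => (d == 'N') == (c == 'N') with hp
        have hcf : (c == 'N') = false := by simpa using hc
        have hstep : pvStepA (ts, [], gs, n, t) c
            = (ts, [c], gs ++ (if t ≠ 0 then [t] else []), n + 1, 0) := by
          simp [pvStepA, hcf]
          split_ifs <;> simp
        have htk : ∀ d ∈ cs'.takeWhile p, d ≠ 'N' := by
          intro d hd
          have := List.mem_takeWhile_imp hd
          simp [hp, hcf] at this
          simpa using this
        have hsplit : cs'.takeWhile p ++ cs'.dropWhile p = cs' :=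
          List.takeWhile_append_dropWhile
        have hC := pv_foldl_Crun (cs'.takeWhile p) htk ts [c]
          (gs ++ (if t ≠ 0 then [t] else [])) (n + 1)
        have hrest : ∀ d, (cs'.dropWhile p).head? = some d → d = 'N' := by
          intro d hd
          have := pv_head_dropWhile p cs' d hd
          simp [hp, hcf] at this
          simpa using this
        set k : Nat := (cs'.takeWhile p).length with hk
        have hih := ih (cs'.dropWhile p)
          (le_trans (List.length_dropWhile_le _ _) hlen')
          ts ([c] ++ cs'.takeWhile p) (gs ++ (if t ≠ 0 then [t] else []))
          (n + 1 + (k : Int)) 0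
          (by intro _; exact ⟨rfl, hrest⟩)
          (by intro h; exact absurd rfl h)
        have hB : pvBloop (c :: cs') n
            = ((pvBloop (cs'.dropWhile p) (n + 1 + (k : Int))).1,
               [pvFmt n (n + 1 + (k : Int) - 1), String.ofList (c :: cs'.takeWhile p)]
                 :: (pvBloop (cs'.dropWhile p) (n + 1 + (k : Int))).2) := by
          rw [pvBloop]
          rw [← hp]
          simp only [hcf, Bool.false_eq_true, if_false, List.length_cons, ← hk]
          have e : n + ((k + 1 : Nat) : Int) = n + 1 + (k : Int) := by push_cast; ring
          rw [e]
        have hflush : pvFlush ([c] ++ cs'.takeWhile p) (n + 1 + (k : Int))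
            = [[pvFmt n (n + 1 + (k : Int) - 1), String.ofList (c :: cs'.takeWhile p)]] := by
          simp only [pvFlush, List.cons_append, List.nil_append, List.isEmpty_cons,
            Bool.false_eq_true, if_false, List.length_cons, ← hk]
          have e : n + 1 + (k : Int) - 1 - ((k + 1 : Nat) : Int) + 1 = n := by push_cast; ring
          rw [e]
        calc pvFinishA (List.foldl pvStepA (ts, [], gs, n, t) (c :: cs'))
            = pvFinishA (List.foldl pvStepA
                (ts, [c], gs ++ (if t ≠ 0 then [t] else []), n + 1, 0)
                (cs'.takeWhile p ++ cs'.dropWhile p)) := by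
              rw [hsplit, List.foldl_cons, hstep]
          _ = pvFinishA (List.foldl pvStepA
                (ts, [c] ++ cs'.takeWhile p, gs ++ (if t ≠ 0 then [t] else []),
                  n + 1 + (k : Int), 0) (cs'.dropWhile p)) := by
              rw [List.foldl_append, hC]
          _ = (gs ++ (if t ≠ 0 then [t] else []) ++ (pvBloop (c :: cs') n).1,
               ts ++ pvFlush [] n ++ (pvBloop (c :: cs') n).2) := by
              rw [hih, hflush, hB]
              simp [pvFlush]
  -- (cases exhausted)

-- ===== VERDICT (by name: the statement is the Claim_ definition above) =====
theorem split_scaffold_spec : Claim_equal_split_scaffold := by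
  intro seq _
  unfold Spec_split_scaffold split_scaffold split_scaffold_alt
  have h := pv_main seq.toList.length seq.toList (le_refl _) [] [] [] 1 0
    (by intro h; exact absurd rfl h) (by intro h; exact absurd rfl h)
  simpa [pvFlush] using h
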